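-- pv_equiv track=rewrite | github.com/MrBrantCode/unitest_baseline | mut_generate/mist_train_cf/cf_53068/solution.py | balanceControlAndRollBack
-- ===== SOURCE A (Python) =====
-- from typing import List
--
-- def balanceControlAndRollBack(operations: List[int], rollBackSteps: int) -> int:
--     balance = 0
--     past_operations = []
--
--     for op in operations:
--         balance += op
--         past_operations.append(op)
--         if len(past_operations) > rollBackSteps:
--             past_operations.pop(0)
--         if balance < 0:
--             while rollBackSteps > 0 and len(past_operations) > 0:
--                 balance -= past_operations.pop()
--                 rollBackSteps -= 1
--             if balance >= 0:
--                 return balance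
--     return max(0, balance)
-- ===== SOURCE B (Python) =====
-- from typing import List
--
-- def balanceControlAndRollBack(operations: List[int], rollBackSteps: int) -> int:
--     # No window list is maintained: the window is always the contiguous slice
--     # operations[lo:i+1], so a rollback is one slice-sum and there is no per-step pop(0).
--     balance = 0
--     k = rollBackSteps
--     s = 0
--     for i, op in enumerate(operations):
--         balance += op
--         if balance < 0 and k > 0:
--             lo = max(s, i + 1 - k)
--             balance -= sum(operations[lo:i + 1])
--             k -= (i + 1 - lo)
--             if balance >= 0:
--                 return balance
--             s = i + 1
--     return max(0, balance)
-- ===== Notes on version B (the rewrite author's own statement) =====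
-- stated objective: alternative
-- what changed: B drops A's maintained past_operations window list (append + pop(0) every step, element-by-element pops on rollback) and tracks the window by index arithmetic instead: the window is always the contiguous slice operations[lo:i+1] with lo = max(s, i+1-k), so a rollback becomes a single slice sum and no list is maintained at all.
import Mathlib
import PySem

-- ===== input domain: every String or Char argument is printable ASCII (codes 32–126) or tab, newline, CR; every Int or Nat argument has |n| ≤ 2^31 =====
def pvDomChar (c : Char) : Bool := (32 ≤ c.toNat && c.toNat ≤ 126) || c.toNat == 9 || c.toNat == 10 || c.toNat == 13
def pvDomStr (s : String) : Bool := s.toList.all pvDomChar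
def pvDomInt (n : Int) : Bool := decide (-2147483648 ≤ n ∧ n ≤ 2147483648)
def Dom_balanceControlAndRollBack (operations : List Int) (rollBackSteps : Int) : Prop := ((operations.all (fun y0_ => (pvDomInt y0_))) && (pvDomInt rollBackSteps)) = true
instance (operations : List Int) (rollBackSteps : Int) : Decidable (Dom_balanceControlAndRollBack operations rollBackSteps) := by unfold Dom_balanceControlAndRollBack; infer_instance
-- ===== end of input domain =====

-- B replaces A's maintained window list (append + pop(0) + per-element pops on rollback) by index
-- arithmetic: the window is always the contiguous slice operations[lo:i+1], so a rollback is one slice-sum.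

-- ===== PORT A =====
-- the inner `while rollBackSteps > 0 and len(past_operations) > 0:` loop
def aWhile (balance rbs : Int) (past : List Int) : Int × Int × List Int :=
  if h : 0 < rbs ∧ past ≠ [] then
    aWhile (balance - past.getLast h.2) (rbs - 1) past.dropLast
  else (balance, rbs, past)
termination_by past.length
decreasing_by
  have := List.length_pos_of_ne_nil h.2
  simp [List.length_dropLast]; omega

-- the `for op in operations:` loop (state: balance, past_operations, rollBackSteps)
def aLoop : List Int → Int → List Int → Int → Int
  | [], balance, _past, _rbs => max 0 balance
  | op :: rest, balance, past, rbs =>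
    let balance := balance + op
    let past := past ++ [op]
    let past := if (past.length : Int) > rbs then past.drop 1 else past
    if balance < 0 then
      let r := aWhile balance rbs past  -- r = (balance, rollBackSteps, past_operations) after the while
      if r.1 ≥ 0 then r.1 else aLoop rest r.1 r.2.2 r.2.1
    else aLoop rest balance past rbs

def balanceControlAndRollBack (operations : List Int) (rollBackSteps : Int) : Int :=
  aLoop operations 0 [] rollBackSteps

-- ===== PORT B =====
-- the `for i, op in enumerate(operations):` loop of Source B (state: balance, k, s; i is the index)
def bLoop (ops : List Int) : List Int → Int → Int → Int → Int → Int
  | [], balance, _k, _s, _i => max 0 balance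
  | op :: rest, balance, k, s, i =>
    let balance := balance + op
    if balance < 0 ∧ 0 < k then
      let lo := max s (i + 1 - k)
      let balance := balance - (PySem.List.slice ops (some lo) (some (i + 1))).sum
      let k := k - (i + 1 - lo)
      if balance ≥ 0 then balance
      else bLoop ops rest balance k (i + 1) (i + 1)
    else bLoop ops rest balance k s (i + 1)

def balanceControlAndRollBack_alt (operations : List Int) (rollBackSteps : Int) : Int :=
  bLoop operations operations 0 rollBackSteps 0 0

-- ===== PRECONDITION & SPEC =====
def Spec_balanceControlAndRollBack (operations : List Int) (rollBackSteps : Int) (out : Int) : Prop := out = balanceControlAndRollBack_alt operations rollBackSteps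
instance (operations : List Int) (rollBackSteps : Int) (out : Int) : Decidable (Spec_balanceControlAndRollBack operations rollBackSteps out) := by unfold Spec_balanceControlAndRollBack; infer_instance

-- ===== CLAIM (what is proved, stated in full; the proofs are below) =====
def Claim_equal_balanceControlAndRollBack : Prop := ∀ (operations : List Int) (rollBackSteps : Int), Dom_balanceControlAndRollBack operations rollBackSteps → Spec_balanceControlAndRollBack operations rollBackSteps (balanceControlAndRollBack operations rollBackSteps)

-- ===== LEMMAS AND PROOFS =====

lemma aWhile_done (b rbs : Int) (past : List Int) (h : ¬(0 < rbs ∧ past ≠ [])) :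
    aWhile b rbs past = (b, rbs, past) := by
  rw [aWhile]; exact dif_neg h

-- once the remaining rollback budget is ≤ 0 both loops just accumulate and clamp at 0
lemma aLoop_nonpos (rest : List Int) : ∀ (b : Int) (past : List Int) (rbs : Int), rbs ≤ 0 →
    aLoop rest b past rbs = max 0 (b + rest.sum) := by
  induction rest with
  | nil => intro b past rbs _; simp [aLoop]
  | cons op rest ih =>
    intro b past rbs hrbs
    simp only [aLoop]
    rw [aWhile_done _ _ _ (by intro h; omega)]
    dsimp only
    by_cases h1 : b + op < 0
    · rw [if_pos h1, if_neg (by omega), ih _ _ _ hrbs]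
      simp only [List.sum_cons]; omega
    · rw [if_neg h1, ih _ _ _ hrbs]
      simp only [List.sum_cons]; omega

lemma bLoop_nonpos (ops rest : List Int) : ∀ (b k s i : Int), k ≤ 0 →
    bLoop ops rest b k s i = max 0 (b + rest.sum) := by
  induction rest with
  | nil => intro b k s i _; simp [bLoop]
  | cons op rest ih =>
    intro b k s i hk
    simp only [bLoop]
    rw [if_neg (by intro h; omega), ih _ _ _ _ hk]
    simp only [List.sum_cons]; omega

-- the while loop empties the whole window when its length is within the budget
lemma aWhile_all (past : List Int) : ∀ (b rbs : Int), (past.length : Int) ≤ rbs →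
    aWhile b rbs past = (b - past.sum, rbs - past.length, []) := by
  induction past using List.reverseRecOn with
  | nil => intro b rbs _; rw [aWhile_done _ _ _ (by simp)]; simp
  | append_singleton ys y ih =>
    intro b rbs h
    simp only [List.length_append, List.length_cons, List.length_nil] at h
    push_cast at h
    rw [aWhile, dif_pos ⟨by omega, by simp⟩]
    rw [List.getLast_append_singleton, List.dropLast_concat]
    rw [ih _ _ (by omega)]
    simp only [List.sum_append, List.sum_cons, List.sum_nil, List.length_append,
      List.length_cons, List.length_nil]
    refine Prod.ext ?_ (Prod.ext ?_ rfl) <;> push_cast <;> ring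

-- main loop invariant: A's window is exactly the slice ops[max s (n-k) : n]
lemma loop_eq (ops : List Int) (rest : List Int) : ∀ (n : Nat) (b k s : Int) (past : List Int),
    rest = ops.drop n → 0 ≤ s → s ≤ (n : Int) →
    (0 < k → past = PySem.List.slice ops (some (max s ((n : Int) - k))) (some (n : Int))) →
    aLoop rest b past k = bLoop ops rest b k s (n : Int) := by
  induction rest with
  | nil => intro n b k s past _ _ _ _; simp [aLoop, bLoop]
  | cons op rest ih =>
    intro n b k s past hdrop hs0 hsn hwin
    by_cases hk : 0 < k
    case neg =>
      rw [aLoop_nonpos _ _ _ _ (by omega), bLoop_nonpos _ _ _ _ _ _ (by omega)]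
    case pos =>
    have hn : n < ops.length := by
      by_contra hle
      have hnil : ops.drop n = [] := List.drop_eq_nil_iff.mpr (by omega)
      rw [← hdrop] at hnil; exact (List.cons_ne_nil _ _) hnil
    have hopn : ops[n]? = some op := by
      have h0 : (ops.drop n)[0]? = some op := by rw [← hdrop]; rfl
      rw [List.getElem?_drop] at h0; simpa using h0
    have hrest : rest = ops.drop (n + 1) := by
      have h1 : List.drop 1 (op :: rest) = List.drop (n + 1) ops := by
        rw [hdrop, List.drop_drop]
      simpa using h1
    set u : Int := max s ((n : Int) - k) with hu
    have hu0 : 0 ≤ u := le_trans hs0 (le_max_left _ _)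
    set a : Nat := u.toNat with haDef
    have haI : (a : Int) = u := Int.toNat_of_nonneg hu0
    have han : a ≤ n := by omega
    have hpast : past = List.take (n - a) (List.drop a ops) := by
      rw [hwin hk, PySem.List.slice_toNat ops hu0 (Int.natCast_nonneg n)]
      have e1 : ((n : Int)).toNat = n := by omega
      rw [e1]
    set u' : Int := max s ((n : Int) + 1 - k) with hu'
    have hu'0 : 0 ≤ u' := le_trans hs0 (le_max_left _ _)
    set a' : Nat := u'.toNat with ha'Def
    have ha'I : (a' : Int) = u' := Int.toNat_of_nonneg hu'0
    have ha'n : a' ≤ n + 1 := by omega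
    have hp1 : past ++ [op] = List.take (n + 1 - a) (List.drop a ops) := by
      rw [hpast]
      have hget : (List.drop a ops)[n - a]? = some op := by
        rw [List.getElem?_drop, Nat.add_sub_cancel' han]; exact hopn
      rw [show n + 1 - a = (n - a) + 1 from by omega, List.take_add_one, hget]
      rfl
    have hlen1 : (((past ++ [op]).length : Nat) : Int) = (n : Int) + 1 - a := by
      rw [hp1]
      simp only [List.length_take, List.length_drop]
      push_cast [Nat.min_def]
      split_ifs <;> omega
    have hpast2 : (if ((past ++ [op]).length : Int) > k then (past ++ [op]).drop 1
        else past ++ [op]) = List.take (n + 1 - a') (List.drop a' ops) := by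
      rw [hlen1]
      split_ifs with hc
      · have haa : a' = a + 1 := by omega
        rw [hp1, haa, List.drop_take, List.drop_drop]
        congr 1
      · have haa : a' = a := by omega
        rw [haa, hp1]
    have hslice : PySem.List.slice ops (some u') (some ((n : Int) + 1))
        = List.take (n + 1 - a') (List.drop a' ops) := by
      rw [PySem.List.slice_toNat ops hu'0 (by omega : (0 : Int) ≤ (n : Int) + 1)]
      have e2 : ((n : Int) + 1).toNat = n + 1 := by omega
      rw [e2]
    have hlen2 : (((List.take (n + 1 - a') (List.drop a' ops)).length : Nat) : Int)
        = (n : Int) + 1 - a' := by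
      simp only [List.length_take, List.length_drop]
      push_cast [Nat.min_def]
      split_ifs <;> omega
    simp only [aLoop, bLoop]
    rw [hpast2]
    by_cases hb : b + op < 0
    · rw [if_pos hb, if_pos (show b + op < 0 ∧ 0 < k from And.intro hb hk),
        aWhile_all _ _ _ (by rw [hlen2]; omega)]
      dsimp only
      have hS : PySem.List.slice ops (some (max s ((n : Int) + 1 - k))) (some ((n : Int) + 1))
          = List.take (n + 1 - a') (List.drop a' ops) := by rw [← hu']; exact hslice
      rw [hS, show max s ((n : Int) + 1 - k) = (a' : Int) from by rw [ha'I, ← hu'], hlen2]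
      split_ifs with hb2
      · rfl
      · have hih := ih (n + 1) (b + op - (List.take (n + 1 - a') (List.drop a' ops)).sum)
          (k - ((n : Int) + 1 - (a' : Int))) ((n : Int) + 1) [] hrest (by omega)
          (by push_cast; omega)
          (by
            intro hk2
            rw [max_eq_left (by omega), PySem.List.slice_toNat ops (by omega) (by omega)]
            simp)
        push_cast at hih ⊢
        exact hih
    · rw [if_neg hb, if_neg (fun h => hb h.1)]
      have hih := ih (n + 1) (b + op) k s (List.take (n + 1 - a') (List.drop a' ops)) hrest hs0
        (by push_cast; omega)
        (by
          intro _
          rw [show ((n + 1 : Nat) : Int) = (n : Int) + 1 from by push_cast; ring, ← hu']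
          exact hslice.symm)
      push_cast at hih ⊢
      exact hih

-- ===== VERDICT (by name: the statement is the Claim_ definition above) =====
theorem balanceControlAndRollBack_spec : Claim_equal_balanceControlAndRollBack := by
  intro operations rollBackSteps _
  unfold Spec_balanceControlAndRollBack balanceControlAndRollBack balanceControlAndRollBack_alt
  have h := loop_eq operations operations 0 0 rollBackSteps 0 [] (by simp) le_rfl le_rfl
    (by
      intro hk
      rw [max_eq_left (by omega), PySem.List.slice_toNat operations (by omega) (by omega)]
      simp)
  simpa using h
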